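-- pv_equiv track=rewrite | github.com/carloshuertag/intelligentSystems | geneticAlgorithms/salga3.8.6-python3.9/fitness/nqueens.py | phenotype
-- ===== SOURCE A (Python) =====
-- n = 12
--
-- def phenotype (chromosome):
--     emptyRow = ['□'] * n
--     board = ''
--     currentRow = ''
--     for i in range(n):
--         currentRow = emptyRow[:]
--         for j in range(n):
--             if (i,j) in chromosome:
--                 currentRow[j] = '■'
--         board += ' '.join(currentRow)
--         board += '\n'
--     return board
-- ===== SOURCE B (Python) =====
-- n = 12
--
-- def phenotype(chromosome):
--     board = [['□'] * n for _ in range(n)]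
--     for (i, j) in chromosome:
--         if 0 <= i < n and 0 <= j < n:
--             board[i][j] = '■'
--     return ''.join(' '.join(row) + '\n' for row in board)
-- ===== Notes on version B (the rewrite author's own statement) =====
-- stated objective: alternative
-- what changed: B builds the 12x12 board once and iterates only over the chromosome's queen positions (placing each in-range one), instead of A's scan of all 144 cells with a linear membership test of the chromosome at each cell.
import Mathlib
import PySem

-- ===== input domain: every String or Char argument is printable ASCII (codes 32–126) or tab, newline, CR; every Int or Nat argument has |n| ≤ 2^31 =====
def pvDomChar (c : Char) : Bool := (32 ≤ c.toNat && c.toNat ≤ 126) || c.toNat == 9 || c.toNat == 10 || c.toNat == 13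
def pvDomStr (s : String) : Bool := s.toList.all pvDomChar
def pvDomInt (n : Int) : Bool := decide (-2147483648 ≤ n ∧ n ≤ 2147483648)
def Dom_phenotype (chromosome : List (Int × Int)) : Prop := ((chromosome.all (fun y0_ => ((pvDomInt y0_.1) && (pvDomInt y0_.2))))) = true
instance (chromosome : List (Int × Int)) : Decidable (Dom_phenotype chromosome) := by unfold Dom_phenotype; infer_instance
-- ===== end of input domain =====

-- B builds the board once and visits only the chromosome's queen positions instead of
-- testing membership for all 144 cells; same return value on every input (objective: alternative).

-- ===== PORT A =====
-- literal transliteration of A: for each cell (i,j) of the 12×12 board, test (i,j) ∈ chromosome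
def phenotype (chromosome : List (Int × Int)) : String :=
  let emptyRow := List.replicate 12 "□"
  (PySem.List.pyRange 0 12 1).foldl (fun board i =>
    let currentRow := (PySem.List.pyRange 0 12 1).foldl
      (fun row j => if (i, j) ∈ chromosome then row.set j.toNat "■" else row) emptyRow
    board ++ PySem.Str.join " " currentRow ++ "\n") ""

-- ===== PORT B =====
-- literal transliteration of B: start from an all-empty board, place each in-range queen, render
def phenotype_alt (chromosome : List (Int × Int)) : String :=
  let board := chromosome.foldl (fun b p =>
      if 0 ≤ p.1 ∧ p.1 < 12 ∧ 0 ≤ p.2 ∧ p.2 < 12 then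
        b.modify p.1.toNat (fun row => row.set p.2.toNat "■")
      else b)
    (List.replicate 12 (List.replicate 12 "□"))
  String.join (board.map (fun row => PySem.Str.join " " row ++ "\n"))

-- ===== PRECONDITION & SPEC =====
def Spec_phenotype (chromosome : List (Int × Int)) (out : String) : Prop := out = phenotype_alt chromosome
instance (chromosome : List (Int × Int)) (out : String) : Decidable (Spec_phenotype chromosome out) := by unfold Spec_phenotype; infer_instance

-- ===== CLAIM (what is proved, stated in full; the proofs are below) =====
def Claim_equal_phenotype : Prop := ∀ (chromosome : List (Int × Int)), Dom_phenotype chromosome → Spec_phenotype chromosome (phenotype chromosome)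

-- ===== LEMMAS AND PROOFS =====

-- string-fold bookkeeping
theorem foldl_str_append (l : List String) : ∀ (a b : String),
    l.foldl (fun r s => r ++ s) (a ++ b) = a ++ l.foldl (fun r s => r ++ s) b := by
  induction l with
  | nil => intro a b; simp
  | cons y l ih => intro a b; simp only [List.foldl, String.append_assoc, ih]

theorem join_cons (x : String) (l : List String) : String.join (x :: l) = x ++ String.join l := by
  simp only [String.join, List.foldl]
  rw [show ("" ++ x : String) = x ++ "" by simp, foldl_str_append]

theorem foldl_two_append (u v : Nat → String) (l : List Nat) (init : String) :
    l.foldl (fun s i => s ++ u i ++ v i) init = init ++ String.join (l.map (fun i => u i ++ v i)) := by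
  induction l generalizing init with
  | nil => simp [String.join]
  | cons x l ih => simp only [List.foldl, List.map, join_cons]; rw [ih]; simp [String.append_assoc]

-- set / modify on a canonical `(List.range m).map g` board
theorem set_map_range {α : Type} (g : Nat → α) (m n : Nat) (x : α) :
    ((List.range m).map g).set n x = (List.range m).map (fun k => if k = n then x else g k) := by
  apply List.ext_getElem
  · simp
  · intro i h1 h2
    simp only [List.getElem_set, List.getElem_map, List.getElem_range]
    rcases eq_or_ne n i with h | h
    · subst h; simp
    · rw [if_neg h, if_neg (by omega : ¬ i = n)]

theorem modify_map_range {α : Type} (g : Nat → α) (m n : Nat) (h : α → α) :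
    ((List.range m).map g).modify n h = (List.range m).map (fun k => if k = n then h (g k) else g k) := by
  apply List.ext_getElem
  · simp
  · intro i h1 h2
    simp only [List.getElem_modify, List.getElem_map, List.getElem_range]
    rcases eq_or_ne n i with h | h
    · subst h; simp
    · rw [if_neg h, if_neg (by omega : ¬ i = n)]

theorem pyRange12 : PySem.List.pyRange 0 12 1 = (List.range 12).map (fun (k : Nat) => ((k : Nat) : Int)) := by decide

-- A's inner loop over j = 0..n-1 produces the membership row
theorem rowA (c : List (Int × Int)) (i : Int) (n : Nat) :
    (List.range n).foldl (fun row (j : Nat) => if (i, (j : Int)) ∈ c then row.set j "■" else row)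
        (List.replicate 12 "□")
      = (List.range 12).map (fun k => if k < n ∧ (i, (k : Int)) ∈ c then "■" else "□") := by
  induction n with
  | zero =>
    apply List.ext_getElem <;> simp
  | succ n ih =>
    rw [List.range_succ, List.foldl_append, ih]
    simp only [List.foldl]
    by_cases hm : (i, (n : Int)) ∈ c
    · rw [if_pos hm, set_map_range]
      apply List.map_congr_left
      intro k _
      by_cases hk : k = n
      · subst hk; simp [hm]
      · simp only [if_neg hk]
        by_cases h1 : k < n
        · simp [h1, Nat.lt_succ_of_lt h1]
        · have : ¬ k < n + 1 := by omega
          simp [h1, this]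
    · rw [if_neg hm]
      apply List.map_congr_left
      intro k _
      by_cases hk : k = n
      · subst hk; simp [hm]
      · by_cases h1 : k < n
        · simp [h1, Nat.lt_succ_of_lt h1]
        · have : ¬ k < n + 1 := by omega
          simp [h1, this]

-- B's loop over the chromosome turns a canonical board into the membership board
theorem foldB (c : List (Int × Int)) (g : Nat → Nat → String) :
    c.foldl (fun b p =>
        if 0 ≤ p.1 ∧ p.1 < 12 ∧ 0 ≤ p.2 ∧ p.2 < 12 then
          b.modify p.1.toNat (fun row => row.set p.2.toNat "■") else b)
      ((List.range 12).map (fun (i : Nat) => (List.range 12).map (fun (j : Nat) => g i j)))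
    = (List.range 12).map (fun (i : Nat) => (List.range 12).map (fun (j : Nat) =>
        if (((i : Nat) : Int), ((j : Nat) : Int)) ∈ c then "■" else g i j)) := by
  induction c generalizing g with
  | nil => simp
  | cons p c ih =>
    simp only [List.foldl]
    by_cases hp : 0 ≤ p.1 ∧ p.1 < 12 ∧ 0 ≤ p.2 ∧ p.2 < 12
    · rw [if_pos hp, modify_map_range]
      have hstep : (List.range 12).map (fun k => if k = p.1.toNat
            then ((List.range 12).map (fun j => g k j)).set p.2.toNat "■"
            else (List.range 12).map (fun j => g k j))
          = (List.range 12).map (fun i => (List.range 12).map (fun j =>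
              if i = p.1.toNat ∧ j = p.2.toNat then "■" else g i j)) := by
        apply List.map_congr_left
        intro k _
        by_cases hk : k = p.1.toNat
        · rw [if_pos hk, set_map_range]
          apply List.map_congr_left
          intro j _
          by_cases hj : j = p.2.toNat <;> simp [hj, hk]
        · rw [if_neg hk]
          apply List.map_congr_left
          intro j _
          simp [hk]
      rw [hstep, ih]
      apply List.map_congr_left
      intro i hi
      apply List.map_congr_left
      intro j hj
      rw [List.mem_range] at hi hj
      by_cases hc : ((i : Int), (j : Int)) ∈ c
      · simp [hc, List.mem_cons]
      · have hpe : (((i : Int), (j : Int)) = p) ↔ (i = p.1.toNat ∧ j = p.2.toNat) := by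
          obtain ⟨h1, h2, h3, h4⟩ := hp
          constructor
          · rintro rfl; simp
          · rintro ⟨rfl, rfl⟩
            have : p = (p.1, p.2) := rfl
            rw [this]
            simp [Int.toNat_of_nonneg h1, Int.toNat_of_nonneg h3]
        simp only [List.mem_cons, hc, or_false, hpe]
        simp
    · rw [if_neg hp, ih]
      apply List.map_congr_left
      intro i hi
      apply List.map_congr_left
      intro j hj
      rw [List.mem_range] at hi hj
      have : ¬ ((i : Int), (j : Int)) = p := by
        rintro rfl
        exact hp ⟨Int.natCast_nonneg i, show ((i : Nat) : Int) < 12 by exact_mod_cast hi,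
          Int.natCast_nonneg j, show ((j : Nat) : Int) < 12 by exact_mod_cast hj⟩
      simp [List.mem_cons, this]

theorem board0_eq : List.replicate 12 (List.replicate 12 "□")
    = (List.range 12).map (fun _ => (List.range 12).map (fun _ => "□")) := by decide

-- ===== VERDICT (by name: the statement is the Claim_ definition above) =====
set_option maxHeartbeats 1000000 in
theorem phenotype_spec : Claim_equal_phenotype := by
  intro c _
  show phenotype c = phenotype_alt c
  unfold phenotype phenotype_alt
  rw [board0_eq, foldB]
  simp only [pyRange12, List.foldl_map, List.map_map]
  have hrow : ∀ i : Nat,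
      (List.range 12).foldl (fun row (j : Nat) =>
          if (((i : Nat) : Int), ((j : Nat) : Int)) ∈ c then row.set ((j : Nat) : Int).toNat "■" else row)
        (List.replicate 12 "□")
      = (List.range 12).map (fun (j : Nat) => if (((i : Nat) : Int), ((j : Nat) : Int)) ∈ c then "■" else "□") := by
    intro i
    have h := rowA c ((i : Nat) : Int) 12
    simp only [Int.toNat_natCast] at h ⊢
    rw [h]
    apply List.map_congr_left
    intro k hk
    rw [List.mem_range] at hk
    simp [hk]
  rw [PySem.List.foldl_congr_mem (List.range 12) _
      (fun board (i : Nat) => board ++ PySem.Str.join " " ((List.range 12).map (fun (j : Nat) =>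
        if (((i : Nat) : Int), ((j : Nat) : Int)) ∈ c then "■" else "□")) ++ "\n") ""
      (fun board i _ => by rw [hrow i]),
    foldl_two_append]
  simp only [Function.comp_def, String.empty_append]
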